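-- pv_equiv track=rewrite | github.com/modisfive/ProblemSolving | Silver5/4659.py | condition_two
-- ===== SOURCE A (Python) =====
-- cons = "bcdfghjklmnpqrstvwxyz"
--
-- vowels = "aeiou"
--
-- def condition_two(string):
--     for i in range(len(string) - 2):
--         if string[i] in cons and string[i + 1] in cons and string[i + 2] in cons:
--             return False
--         elif (
--             string[i] in vowels and string[i + 1] in vowels and string[i + 2] in vowels
--         ):
--             return False
--     return True
-- ===== SOURCE B (Python) =====
-- cons = "bcdfghjklmnpqrstvwxyz"
--
-- vowels = "aeiou"
--
-- def condition_two(string):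
--     prev = None
--     run = 0
--     for ch in string:
--         if ch in vowels:
--             cls = "v"
--         elif ch in cons:
--             cls = "c"
--         else:
--             cls = None
--         if cls is not None and cls == prev:
--             run += 1
--         elif cls is not None:
--             run = 1
--         else:
--             run = 0
--         prev = cls
--         if run >= 3:
--             return False
--     return True
-- ===== Notes on version B (the rewrite author's own statement) =====
-- stated objective: alternative
-- what changed: Replaced the indexed sliding-window scan re-checking three characters per position with a single pass that classifies each character once and maintains a running same-class run length, returning False when the run reaches 3.
import Mathlib
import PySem

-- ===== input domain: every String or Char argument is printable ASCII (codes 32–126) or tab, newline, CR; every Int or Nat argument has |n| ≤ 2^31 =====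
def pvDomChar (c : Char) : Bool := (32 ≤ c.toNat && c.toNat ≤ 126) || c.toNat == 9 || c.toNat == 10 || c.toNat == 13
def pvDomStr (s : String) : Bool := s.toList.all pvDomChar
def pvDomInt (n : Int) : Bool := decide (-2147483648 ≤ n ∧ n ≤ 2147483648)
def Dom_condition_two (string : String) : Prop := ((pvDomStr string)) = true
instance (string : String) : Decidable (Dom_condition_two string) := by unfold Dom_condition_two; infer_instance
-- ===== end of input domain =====

-- B replaces A's indexed three-character sliding window with a single pass keeping a
-- running same-class run length (objective: alternative decomposition, same cost).

-- ===== PORT A =====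
def pvCons : List Char := "bcdfghjklmnpqrstvwxyz".toList
def pvVowels : List Char := "aeiou".toList

-- A's loop over i in range(len-2) testing string[i], string[i+1], string[i+2]:
-- each step looks at the current three-character window and then advances by one.
def condTwoLoopA : List Char → Bool
  | c1 :: c2 :: c3 :: rest =>
    if pvCons.contains c1 && pvCons.contains c2 && pvCons.contains c3 then false
    else if pvVowels.contains c1 && pvVowels.contains c2 && pvVowels.contains c3 then false
    else condTwoLoopA (c2 :: c3 :: rest)
  | _ => true
termination_by l => l.length
decreasing_by simp

def condition_two (string : String) : Bool := condTwoLoopA string.toList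

-- ===== PORT B =====
-- class of a character: some true = vowel, some false = consonant, none = neither
def pvClassOf (c : Char) : Option Bool :=
  if pvVowels.contains c then some true
  else if pvCons.contains c then some false
  else none

def condTwoLoopB : List Char → Option Bool → Nat → Bool
  | [], _, _ => true
  | c :: rest, prev, run =>
    let cls := pvClassOf c
    let run' := if cls.isSome && cls == prev then run + 1
                else if cls.isSome then 1 else 0
    if run' ≥ 3 then false else condTwoLoopB rest cls run'

def condition_two_alt (string : String) : Bool := condTwoLoopB string.toList none 0

-- ===== PRECONDITION & SPEC =====
def Spec_condition_two (string : String) (out : Bool) : Prop := out = condition_two_alt string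
instance (string : String) (out : Bool) : Decidable (Spec_condition_two string out) := by unfold Spec_condition_two; infer_instance

-- ===== CLAIM (what is proved, stated in full; the proofs are below) =====
def Claim_equal_condition_two : Prop := ∀ (string : String), Dom_condition_two string → Spec_condition_two string (condition_two string)

-- ===== LEMMAS AND PROOFS =====

-- run length contributed by the last two consumed characters
def pvRun2 (c1 c2 : Char) : Nat :=
  match pvClassOf c2 with
  | none => 0
  | some _ => if pvClassOf c1 = pvClassOf c2 then 2 else 1

lemma pvVowel_not_cons (c : Char) (h : pvVowels.contains c = true) :
    pvCons.contains c = false := by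
  simp [pvVowels] at h
  rcases h with rfl | rfl | rfl | rfl | rfl <;> decide

lemma pvMain (l : List Char) : ∀ c1 c2 : Char,
    condTwoLoopA (c1 :: c2 :: l) = condTwoLoopB l (pvClassOf c2) (pvRun2 c1 c2) := by
  induction l with
  | nil => intro c1 c2; simp [condTwoLoopA, condTwoLoopB]
  | cons c3 rest ih =>
    intro c1 c2
    have d1 := pvVowel_not_cons c1
    have d2 := pvVowel_not_cons c2
    have d3 := pvVowel_not_cons c3
    rw [condTwoLoopA, ih c2 c3]
    rcases e1 : pvCons.contains c1 <;> rcases f1 : pvVowels.contains c1 <;>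
    rcases e2 : pvCons.contains c2 <;> rcases f2 : pvVowels.contains c2 <;>
    rcases e3 : pvCons.contains c3 <;> rcases f3 : pvVowels.contains c3 <;>
      simp_all [condTwoLoopB, pvClassOf, pvRun2]

lemma pvTwoSteps (l : List Char) (c1 c2 : Char) :
    condTwoLoopB (c1 :: c2 :: l) none 0 = condTwoLoopB l (pvClassOf c2) (pvRun2 c1 c2) := by
  have d1 := pvVowel_not_cons c1
  have d2 := pvVowel_not_cons c2
  rcases e1 : pvCons.contains c1 <;> rcases f1 : pvVowels.contains c1 <;>
  rcases e2 : pvCons.contains c2 <;> rcases f2 : pvVowels.contains c2 <;>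
    simp_all [condTwoLoopB, pvClassOf, pvRun2]

-- ===== VERDICT (by name: the statement is the Claim_ definition above) =====
theorem condition_two_spec : Claim_equal_condition_two := by
  intro s _
  unfold Spec_condition_two condition_two condition_two_alt
  match h : s.toList with
  | [] => simp [condTwoLoopA, condTwoLoopB]
  | [c] =>
    have d := pvVowel_not_cons c
    rcases e : pvCons.contains c <;> rcases f : pvVowels.contains c <;>
      simp_all [condTwoLoopA, condTwoLoopB, pvClassOf]
  | c1 :: c2 :: rest => rw [pvMain rest c1 c2, pvTwoSteps]
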